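-- pv_equiv track=rewrite | github.com/it-teaching-abo-akademi/assignment-1---step-counting-Md-Mahbub-Islam | stepcounter.py | generate_step_array
-- ===== SOURCE A (Python) =====
-- def generate_step_array(timestamps, step_time):
--   s_arr = []
--   ctr = 0
--   for i, time in enumerate(timestamps):
--     if(ctr<len(step_time) and step_time[ctr]<=time):
--       ctr += 1
--       s_arr.append( 60 ) # in my case magnitude is so small that 50000 is too big
--     else:
--       s_arr.append( 0 )
--   while(len(s_arr)<len(timestamps)):
--     s_arr.append(0)
--   return s_arr
-- ===== SOURCE B (Python) =====
-- def generate_step_array(timestamps, step_time):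
--     result = [0] * len(timestamps)
--     i = 0
--     for th in step_time:
--         while i < len(timestamps) and timestamps[i] < th:
--             i += 1
--         if i < len(timestamps):
--             result[i] = 60
--             i += 1
--         else:
--             break
--     return result
-- ===== Notes on version B (the rewrite author's own statement) =====
-- stated objective: alternative
-- what changed: B inverts the loop nesting: instead of A's single pass over timestamps that appends 60/0 per element while advancing a step_time counter, B preallocates a zero array and iterates over step_time, advancing one timestamp index with an inner skip-while and writing 60 into the matched position, breaking early when timestamps are exhausted.
import Mathlib
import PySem

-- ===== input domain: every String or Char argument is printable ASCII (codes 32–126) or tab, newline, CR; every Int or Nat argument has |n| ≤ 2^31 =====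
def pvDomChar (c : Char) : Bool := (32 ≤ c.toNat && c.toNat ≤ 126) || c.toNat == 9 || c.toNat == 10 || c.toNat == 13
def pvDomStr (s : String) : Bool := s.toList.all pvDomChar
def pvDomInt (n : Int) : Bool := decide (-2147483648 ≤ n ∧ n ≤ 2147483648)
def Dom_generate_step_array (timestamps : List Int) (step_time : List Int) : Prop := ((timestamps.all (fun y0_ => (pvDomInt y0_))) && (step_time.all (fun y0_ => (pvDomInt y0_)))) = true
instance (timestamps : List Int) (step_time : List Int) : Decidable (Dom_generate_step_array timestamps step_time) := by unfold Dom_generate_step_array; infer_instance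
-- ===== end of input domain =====

-- B inverts the loop nesting: it iterates over step_time, advancing one timestamp index and
-- writing 60 into a preallocated zero array, instead of A's per-timestamp scan with appends;
-- objective: alternative (same asymptotic cost).

-- ===== PORT A =====
-- the for loop of A: walks the timestamps, ctr is the index into step_time
def pvALoop (step_time : List Int) : List Int → Nat → List Int
  | [], _ => []
  | t :: ts, ctr =>
      if ctr < step_time.length ∧ step_time.getD ctr 0 ≤ t then
        60 :: pvALoop step_time ts (ctr + 1)
      else
        0 :: pvALoop step_time ts ctr

-- the trailing 'while(len(s_arr)<len(timestamps)): s_arr.append(0)' of A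
def pvAPad (s : List Int) (n : Nat) : List Int :=
  if s.length < n then pvAPad (s ++ [0]) n else s
termination_by n - s.length
decreasing_by simp_all; omega

def generate_step_array (timestamps : List Int) (step_time : List Int) : List Int :=
  pvAPad (pvALoop step_time timestamps 0) timestamps.length

-- ===== PORT B =====
-- 'while i < len(timestamps) and timestamps[i] < th: i += 1'
def pvSkip (ts : List Int) (th : Int) (i : Nat) : Nat :=
  if i < ts.length then
    if ts.getD i 0 < th then pvSkip ts th (i + 1) else i
  else i
termination_by ts.length - i
decreasing_by omega

-- 'for th in step_time: …' writing into the preallocated array res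
def pvBLoop (ts : List Int) (res : List Int) (i : Nat) : List Int → List Int
  | [] => res
  | th :: rest =>
      let i' := pvSkip ts th i
      if i' < ts.length then pvBLoop ts (res.set i' 60) (i' + 1) rest
      else res

def generate_step_array_alt (timestamps : List Int) (step_time : List Int) : List Int :=
  pvBLoop timestamps (List.replicate timestamps.length 0) 0 step_time

-- ===== PRECONDITION & SPEC =====
def Spec_generate_step_array (timestamps : List Int) (step_time : List Int) (out : List Int) : Prop := out = generate_step_array_alt timestamps step_time
instance (timestamps : List Int) (step_time : List Int) (out : List Int) : Decidable (Spec_generate_step_array timestamps step_time out) := by unfold Spec_generate_step_array; infer_instance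

-- ===== CLAIM (what is proved, stated in full; the proofs are below) =====
def Claim_equal_generate_step_array : Prop := ∀ (timestamps : List Int) (step_time : List Int), Dom_generate_step_array timestamps step_time → Spec_generate_step_array timestamps step_time (generate_step_array timestamps step_time)

-- ===== LEMMAS AND PROOFS =====

-- common reference function on the timestamp suffix and the remaining thresholds
def pvSpec : List Int → List Int → List Int
  | [], _ => []
  | _ :: ts, [] => 0 :: pvSpec ts []
  | t :: ts, th :: ths => if th ≤ t then 60 :: pvSpec ts ths else 0 :: pvSpec ts (th :: ths)

theorem pvSpec_nil (ts : List Int) : pvSpec ts [] = List.replicate ts.length 0 := by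
  induction ts with
  | nil => simp [pvSpec]
  | cons t ts ih => simp [pvSpec, ih, List.replicate]

theorem pvSpec_length (ts ths : List Int) : (pvSpec ts ths).length = ts.length := by
  induction ts generalizing ths with
  | nil => simp [pvSpec]
  | cons t ts ih =>
    cases ths with
    | nil => simp [pvSpec, ih]
    | cons th rest => by_cases h : th ≤ t <;> simp [pvSpec, h, ih]

theorem pvALoop_eq_pvSpec (st ts : List Int) (ctr : Nat) :
    pvALoop st ts ctr = pvSpec ts (st.drop ctr) := by
  induction ts generalizing ctr with
  | nil => simp [pvALoop, pvSpec]
  | cons t ts ih =>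
    rcases h : st.drop ctr with _ | ⟨th, rest⟩
    · have hlen : ¬ ctr < st.length := by
        have := congrArg List.length h; simp at this; omega
      simp only [pvALoop]
      rw [if_neg (by simp [hlen]), ih ctr, h]
      simp only [pvSpec]
    · have hlen : ctr < st.length := by
        have := congrArg List.length h; simp at this; omega
      have hsome : st[ctr]? = some th := by
        have := congrArg (fun l => l[0]?) h
        simpa [List.getElem?_drop] using this
      have hgetD : st.getD ctr 0 = th := by
        rw [List.getD_eq_getElem?_getD, hsome]; rfl
      have hdrop : st.drop (ctr + 1) = rest := by
        have h2 := congrArg List.tail h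
        rw [List.tail_drop] at h2
        simpa using h2
      by_cases hc : th ≤ t
      · simp only [pvALoop]
        rw [if_pos ⟨hlen, by rw [hgetD]; exact hc⟩, ih (ctr + 1), hdrop]
        simp only [pvSpec]
        rw [if_pos hc]
      · simp only [pvALoop]
        rw [if_neg (by rw [hgetD]; tauto), ih ctr, h]
        simp only [pvSpec]
        rw [if_neg hc]

theorem pvSkip_ge (ts : List Int) (th : Int) (i : Nat) : i ≤ pvSkip ts th i := by
  unfold pvSkip
  split
  · split
    · have := pvSkip_ge ts th (i + 1); omega
    · omega
  · omega
termination_by ts.length - i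
decreasing_by omega

theorem pvSkip_le (ts : List Int) (th : Int) (i : Nat) (h : i ≤ ts.length) :
    pvSkip ts th i ≤ ts.length := by
  unfold pvSkip
  split
  · split
    · exact pvSkip_le ts th (i + 1) (by omega)
    · omega
  · omega
termination_by ts.length - i
decreasing_by omega

-- the key step lemma: what pvSpec does on the suffix from i, for one threshold
theorem pvSpec_skip (ts : List Int) (th : Int) (rest : List Int) (i : Nat) (hi : i ≤ ts.length) :
    pvSpec (ts.drop i) (th :: rest) =
      List.replicate (pvSkip ts th i - i) 0 ++
        (if pvSkip ts th i < ts.length then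
            60 :: pvSpec (ts.drop (pvSkip ts th i + 1)) rest
          else []) := by
  rcases h : ts.drop i with _ | ⟨t, ts'⟩
  · have hlen : i = ts.length := by
      have := congrArg List.length h; simp at this; omega
    have hskip : pvSkip ts th i = i := by
      rw [pvSkip]; simp [hlen]
    rw [hskip]
    simp [pvSpec, hlen]
  · have hlen : i < ts.length := by
      have := congrArg List.length h; simp at this; omega
    have hsome : ts[i]? = some t := by
      have := congrArg (fun l => l[0]?) h
      simpa [List.getElem?_drop] using this
    have hgetD : ts.getD i 0 = t := by
      rw [List.getD_eq_getElem?_getD, hsome]; rfl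
    have hdrop : ts.drop (i + 1) = ts' := by
      have h2 := congrArg List.tail h
      rw [List.tail_drop] at h2
      simpa using h2
    by_cases hc : t < th
    · have hskip : pvSkip ts th i = pvSkip ts th (i + 1) := by
        rw [pvSkip, if_pos hlen, if_pos (by rw [hgetD]; exact hc)]
      have ih := pvSpec_skip ts th rest (i + 1) (by omega)
      rw [hdrop] at ih
      have hge := pvSkip_ge ts th (i + 1)
      simp only [pvSpec]
      rw [if_neg (by omega), ih, hskip,
        (by omega : pvSkip ts th (i + 1) - i = (pvSkip ts th (i + 1) - (i + 1)) + 1),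
        List.replicate_succ]
      simp
    · have hskip : pvSkip ts th i = i := by
        rw [pvSkip, if_pos hlen, if_neg (by rw [hgetD]; exact hc)]
      rw [hskip]
      simp only [pvSpec]
      rw [if_pos (by omega), if_pos hlen, hdrop]
      simp
termination_by ts.length - i
decreasing_by omega

theorem pvBLoop_eq (ts : List Int) (ths : List Int) (res : List Int) (i : Nat)
    (hlen : res.length = ts.length) (hi : i ≤ ts.length)
    (hz : res.drop i = List.replicate (ts.length - i) 0) :
    pvBLoop ts res i ths = res.take i ++ pvSpec (ts.drop i) ths := by
  induction ths generalizing res i with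
  | nil =>
    simp only [pvBLoop, pvSpec_nil]
    conv_lhs => rw [← List.take_append_drop i res]
    rw [hz]
    simp
  | cons th rest ih =>
    have hge := pvSkip_ge ts th i
    have hle := pvSkip_le ts th i hi
    set i' := pvSkip ts th i with hi'
    rw [pvSpec_skip ts th rest i hi]
    simp only [pvBLoop, ← hi']
    by_cases hlt : i' < ts.length
    · rw [if_pos hlt, if_pos hlt]
      have hz' : (res.set i' 60).drop (i' + 1) = List.replicate (ts.length - (i' + 1)) 0 := by
        rw [List.drop_set_of_lt (by omega)]
        have h2 : res.drop (i' + 1) = (res.drop i).drop (i' + 1 - i) := by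
          rw [List.drop_drop]; congr 1; omega
        rw [h2, hz, List.drop_replicate]
        congr 1; omega
      rw [ih (res.set i' 60) (i' + 1) (by simp [hlen]) (by omega) hz']
      have htake : (res.set i' 60).take (i' + 1)
          = res.take i ++ List.replicate (i' - i) 0 ++ [60] := by
        have h1 : (res.set i' 60).take (i' + 1)
            = (res.set i' 60).take i' ++ [60] := by
          rw [List.take_add_one]
          simp [hlen, hlt]
        have h2 : (res.set i' 60).take i' = res.take i' := by
          rw [List.take_set_of_le (le_refl i')]
        have h3 : res.take i' = res.take i ++ List.replicate (i' - i) 0 := by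
          rw [(by omega : i' = i + (i' - i)), List.take_add]
          congr 1
          rw [hz, List.take_replicate]
          congr 1; omega
        rw [h1, h2, h3]
      rw [htake]
      simp
    · rw [if_neg hlt, if_neg hlt]
      have hi'len : i' = ts.length := by omega
      conv_lhs => rw [← List.take_append_drop i res]
      rw [hz]
      congr 1
      simp [hi'len]

-- A's padding is the identity when the list already has the right length
theorem pvAPad_eq (s : List Int) (n : Nat) (h : s.length = n) : pvAPad s n = s := by
  unfold pvAPad
  simp [h]

theorem gen_eq (ts st : List Int) :
    generate_step_array ts st = generate_step_array_alt ts st := by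
  unfold generate_step_array generate_step_array_alt
  rw [pvALoop_eq_pvSpec, pvAPad_eq _ _ (by simp [pvSpec_length])]
  rw [pvBLoop_eq ts st (List.replicate ts.length 0) 0 (by simp) (by omega) (by simp)]
  simp

-- ===== VERDICT (by name: the statement is the Claim_ definition above) =====
theorem generate_step_array_spec : Claim_equal_generate_step_array := by
  intro ts st _
  unfold Spec_generate_step_array
  exact gen_eq ts st
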